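-- pv_equiv track=rewrite | github.com/wojasek12/PokemonBot | AlgoHelper.py | create_list_of_pokemon_to_users
-- ===== SOURCE A (Python) =====
-- def create_list_of_pokemon_to_users(pokemon_to_url, seller_pokemon_price_dict):
--     """
--     Create list of pokemons and users who have them
--     :param pokemon_to_url: dict, pokemon to url
--     :param seller_pokemon_price_dict: dict
--     :return: dict
--     """
--     pokemon_names_list = [list(pokemon)[0] for pokemon in pokemon_to_url]
--     pokemon_to_users_list = {}
--     for pokemon in pokemon_names_list:
--         for user in seller_pokemon_price_dict:
--             if pokemon in seller_pokemon_price_dict[user].keys():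
--                 # pokemon_to_users_list.setdefault(pokemon, []).append({user: userdict3[user][pokemon]})
--                 if pokemon in pokemon_to_users_list.keys():
--                     pokemon_to_users_list[pokemon].update({user: seller_pokemon_price_dict[user][pokemon]})
--                 else:
--                     pokemon_to_users_list[pokemon] = {user: seller_pokemon_price_dict[user][pokemon]}
--     return pokemon_to_users_list
-- ===== SOURCE B (Python) =====
-- def create_list_of_pokemon_to_users(pokemon_to_url, seller_pokemon_price_dict):
--     index = {}
--     for user, udict in seller_pokemon_price_dict.items():
--         for pokemon, price in udict.items():
--             index.setdefault(pokemon, {})[user] = price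
--     result = {}
--     for pokemon_dict in pokemon_to_url:
--         name = next(iter(pokemon_dict))
--         if name in index:
--             result[name] = index[name]
--     return result
-- ===== Notes on version B (the rewrite author's own statement) =====
-- stated objective: faster
-- what changed: Instead of scanning every seller for every pokemon name (nested loops), B inverts the seller data once into a pokemon->{user:price} index and then emits the names in order with a single lookup each.
import Mathlib
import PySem

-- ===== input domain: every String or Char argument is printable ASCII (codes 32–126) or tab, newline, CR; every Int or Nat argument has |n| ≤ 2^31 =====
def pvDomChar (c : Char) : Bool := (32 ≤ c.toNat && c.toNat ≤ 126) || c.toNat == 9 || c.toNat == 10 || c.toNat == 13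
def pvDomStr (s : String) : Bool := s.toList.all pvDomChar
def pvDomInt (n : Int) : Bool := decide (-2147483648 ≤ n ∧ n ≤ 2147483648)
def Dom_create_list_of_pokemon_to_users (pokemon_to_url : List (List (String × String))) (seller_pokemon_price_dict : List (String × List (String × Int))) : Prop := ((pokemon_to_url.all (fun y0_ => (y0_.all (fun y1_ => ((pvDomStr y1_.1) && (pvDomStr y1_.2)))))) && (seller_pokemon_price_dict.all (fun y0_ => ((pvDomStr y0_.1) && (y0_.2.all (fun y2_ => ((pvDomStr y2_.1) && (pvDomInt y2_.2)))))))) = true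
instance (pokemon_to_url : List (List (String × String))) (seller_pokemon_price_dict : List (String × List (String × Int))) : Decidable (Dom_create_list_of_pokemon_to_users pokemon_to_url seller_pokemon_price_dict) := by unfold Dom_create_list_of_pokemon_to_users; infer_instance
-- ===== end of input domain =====

-- B replaces A's pokemon×seller nested scan by one inversion pass over the seller data
-- (a pokemon -> {user: price} index) followed by a single lookup per pokemon name (faster: asymptotic).

-- ===== PORT A =====
def create_list_of_pokemon_to_users (pokemon_to_url : List (List (String × String))) (seller_pokemon_price_dict : List (String × List (String × Int))) : List (String × List (String × Int)) :=
  -- the two dict parameters as PySem dicts (the inner lists are Python dicts)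
  let spd : PySem.Dict String (PySem.Dict String Int) :=
    PySem.Dict.ofList (seller_pokemon_price_dict.map (fun p => (p.1, PySem.Dict.ofList p.2)))
  -- pokemon_names_list = [list(pokemon)[0] for pokemon in pokemon_to_url]  (the getD "" is unreachable under Pre_)
  let pokemon_names_list : List String :=
    pokemon_to_url.map (fun pokemon =>
      (PySem.List.pyGet? (PySem.Dict.keys (PySem.Dict.ofList pokemon)) 0).getD "")
  let result : PySem.Dict String (PySem.Dict String Int) :=
    pokemon_names_list.foldl (fun acc pokemon =>
      (PySem.Dict.keys spd).foldl (fun acc user =>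
        if PySem.Dict.contains (PySem.Dict.getD spd user PySem.Dict.empty) pokemon then
          if PySem.Dict.contains acc pokemon then
            PySem.Dict.modify acc pokemon PySem.Dict.empty
              (fun d => PySem.Dict.insert d user
                (PySem.Dict.getD (PySem.Dict.getD spd user PySem.Dict.empty) pokemon 0))
          else
            PySem.Dict.insert acc pokemon
              (PySem.Dict.insert PySem.Dict.empty user
                (PySem.Dict.getD (PySem.Dict.getD spd user PySem.Dict.empty) pokemon 0))
        else acc) acc) PySem.Dict.empty
  result.items.map (fun p => (p.1, p.2.items))

-- ===== PORT B =====
def create_list_of_pokemon_to_users_alt (pokemon_to_url : List (List (String × String))) (seller_pokemon_price_dict : List (String × List (String × Int))) : List (String × List (String × Int)) :=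
  let spd : PySem.Dict String (PySem.Dict String Int) :=
    PySem.Dict.ofList (seller_pokemon_price_dict.map (fun p => (p.1, PySem.Dict.ofList p.2)))
  -- index.setdefault(pokemon, {})[user] = price, over all (user, udict) and (pokemon, price)
  let index : PySem.Dict String (PySem.Dict String Int) :=
    spd.items.foldl (fun idx uu =>
      uu.2.items.foldl (fun idx pp =>
        PySem.Dict.modify idx pp.1 PySem.Dict.empty (fun d => PySem.Dict.insert d uu.1 pp.2)) idx)
      PySem.Dict.empty
  -- name = next(iter(pokemon_dict))  (the getD "" is unreachable under Pre_)
  let result : PySem.Dict String (PySem.Dict String Int) :=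
    pokemon_to_url.foldl (fun res pokemon_dict =>
      if PySem.Dict.contains index ((PySem.Dict.keys (PySem.Dict.ofList pokemon_dict)).head?.getD "") then
        PySem.Dict.insert res ((PySem.Dict.keys (PySem.Dict.ofList pokemon_dict)).head?.getD "")
          (PySem.Dict.getD index ((PySem.Dict.keys (PySem.Dict.ofList pokemon_dict)).head?.getD "") PySem.Dict.empty)
      else res) PySem.Dict.empty
  result.items.map (fun p => (p.1, p.2.items))

-- ===== PRECONDITION & SPEC =====
-- Pre_ excludes inner dicts of pokemon_to_url that are empty: there Python A's list(pokemon)[0] raises IndexError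
-- (and B's next(iter(pokemon_dict)) raises StopIteration).
def Pre_create_list_of_pokemon_to_users (pokemon_to_url : List (List (String × String))) (seller_pokemon_price_dict : List (String × List (String × Int))) : Prop :=
  ∀ d ∈ pokemon_to_url, d ≠ []
instance (pokemon_to_url : List (List (String × String))) (seller_pokemon_price_dict : List (String × List (String × Int))) : Decidable (Pre_create_list_of_pokemon_to_users pokemon_to_url seller_pokemon_price_dict) := by unfold Pre_create_list_of_pokemon_to_users; infer_instance
def pvWitness_create_list_of_pokemon_to_users : (List (List (String × String))) × (List (String × List (String × Int))) :=
  ([[("pikachu", "url1")], [("eevee", "url2")]], [("ash", [("pikachu", 5)]), ("misty", [("pikachu", 7), ("mew", 1)])])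

def Spec_create_list_of_pokemon_to_users (pokemon_to_url : List (List (String × String))) (seller_pokemon_price_dict : List (String × List (String × Int))) (out : List (String × List (String × Int))) : Prop := out = create_list_of_pokemon_to_users_alt pokemon_to_url seller_pokemon_price_dict
instance (pokemon_to_url : List (List (String × String))) (seller_pokemon_price_dict : List (String × List (String × Int))) (out : List (String × List (String × Int))) : Decidable (Spec_create_list_of_pokemon_to_users pokemon_to_url seller_pokemon_price_dict out) := by unfold Spec_create_list_of_pokemon_to_users; infer_instance

-- ===== CLAIM (what is proved, stated in full; the proofs are below) =====
def Claim_equal_create_list_of_pokemon_to_users : Prop := ∀ (pokemon_to_url : List (List (String × String))) (seller_pokemon_price_dict : List (String × List (String × Int))), Dom_create_list_of_pokemon_to_users pokemon_to_url seller_pokemon_price_dict → Pre_create_list_of_pokemon_to_users pokemon_to_url seller_pokemon_price_dict → Spec_create_list_of_pokemon_to_users pokemon_to_url seller_pokemon_price_dict (create_list_of_pokemon_to_users pokemon_to_url seller_pokemon_price_dict)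

-- ===== LEMMAS AND PROOFS =====

-- the (user, price) dict accumulated for one pokemon name p, as a fold over the seller items
def pvFill (p : String) (us : List (String × PySem.Dict String Int)) (d : PySem.Dict String Int) : PySem.Dict String Int :=
  us.foldl (fun d uu => if PySem.Dict.contains uu.2 p then PySem.Dict.insert d uu.1 (PySem.Dict.getD uu.2 p 0) else d) d

def pvHit (p : String) (us : List (String × PySem.Dict String Int)) : Bool :=
  us.any (fun uu => PySem.Dict.contains uu.2 p)

theorem pv_pyGet_zero {α : Type} (l : List α) : PySem.List.pyGet? l 0 = l.head? := by
  cases l <;> simp [PySem.List.pyGet?, PySem.List.pyIdx?]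

-- a fold whose every step fixes the accumulator is the identity
theorem pv_foldl_id {α β : Type} (l : List α) (f : β → α → β) (d : β)
    (h : ∀ x ∈ l, f d x = d) : l.foldl f d = d := by
  induction l with
  | nil => rfl
  | cons x t ih =>
    rw [List.foldl_cons, h x (by simp)]
    exact ih (fun y hy => h y (by simp [hy]))

-- a guarded fold with no hits is the identity
theorem pv_foldl_skip {α β : Type} (l : List α) (c : α → Bool) (f : β → α → β) (d : β)
    (h : l.any c = false) : l.foldl (fun d x => if c x then f d x else d) d = d := by
  apply pv_foldl_id
  intro x hx
  have : c x = false := by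
    cases hcx : c x
    · rfl
    · exact absurd (List.any_eq_true.mpr ⟨x, hx, hcx⟩) (by simp [h])
  simp [this]

-- overwriting a key with the value it already has is the identity (keys unique)
theorem pv_insert_self {ν : Type} (d : PySem.Dict String ν) (k : String) (v : ν)
    (hnd : d.keys.Nodup) (h : d.get? k = some v) : d.insert k v = d := by
  have hc : d.contains k = true := by
    rw [PySem.Dict.contains_eq_isSome_get?, h]; rfl
  apply PySem.Dict.ext
  show (d.insert k v).items = d.items
  unfold PySem.Dict.insert
  rw [if_pos hc]
  show d.items.map (fun p => if p.1 == k then (k, v) else p) = d.items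
  have hpt : ∀ pr ∈ d.items, (if pr.1 == k then (k, v) else pr) = pr := by
    intro pr hpr
    by_cases hk : pr.1 = k
    · have hmem : (k, pr.2) ∈ d.items := by rw [← hk]; exact hpr
      have : d.get? k = some pr.2 := (PySem.Dict.get?_eq_some_iff_mem_items d k pr.2 hnd).mpr hmem
      have hv : pr.2 = v := by rw [this] at h; exact (Option.some.injEq _ _).mp h
      have : (if (pr.1 == k) = true then (k, v) else pr) = (k, v) := by simp [hk]
      rw [this, ← hv, ← hk]
    · simp [hk]
  rw [List.map_congr_left hpt]
  simp

-- A's inner loop (over the seller keys), characterised as one insert of a filled dict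
theorem pv_inner (p : String) (U : PySem.Dict String (PySem.Dict String Int))
    (users : List String) (acc : PySem.Dict String (PySem.Dict String Int)) :
    users.foldl (fun acc user =>
      if PySem.Dict.contains (PySem.Dict.getD U user PySem.Dict.empty) p then
        if PySem.Dict.contains acc p then
          PySem.Dict.modify acc p PySem.Dict.empty
            (fun d => PySem.Dict.insert d user
              (PySem.Dict.getD (PySem.Dict.getD U user PySem.Dict.empty) p 0))
        else
          PySem.Dict.insert acc p
            (PySem.Dict.insert PySem.Dict.empty user
              (PySem.Dict.getD (PySem.Dict.getD U user PySem.Dict.empty) p 0))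
      else acc) acc
    = if users.any (fun u => PySem.Dict.contains (PySem.Dict.getD U u PySem.Dict.empty) p) then
        PySem.Dict.insert acc p
          (users.foldl (fun d u =>
            if PySem.Dict.contains (PySem.Dict.getD U u PySem.Dict.empty) p then
              PySem.Dict.insert d u (PySem.Dict.getD (PySem.Dict.getD U u PySem.Dict.empty) p 0)
            else d) (PySem.Dict.getD acc p PySem.Dict.empty))
      else acc := by
  induction users generalizing acc with
  | nil => simp
  | cons u us ih =>
    rw [List.foldl_cons, List.any_cons]
    by_cases hc : PySem.Dict.contains (PySem.Dict.getD U u PySem.Dict.empty) p = true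
    · -- the head user sells p: the step is acc.insert p ((acc.getD p ∅).insert u price)
      have hstep : (if PySem.Dict.contains (PySem.Dict.getD U u PySem.Dict.empty) p then
          if PySem.Dict.contains acc p then
            PySem.Dict.modify acc p PySem.Dict.empty
              (fun d => PySem.Dict.insert d u
                (PySem.Dict.getD (PySem.Dict.getD U u PySem.Dict.empty) p 0))
          else
            PySem.Dict.insert acc p
              (PySem.Dict.insert PySem.Dict.empty u
                (PySem.Dict.getD (PySem.Dict.getD U u PySem.Dict.empty) p 0))
        else acc)
        = PySem.Dict.insert acc p
            (PySem.Dict.insert (PySem.Dict.getD acc p PySem.Dict.empty) u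
              (PySem.Dict.getD (PySem.Dict.getD U u PySem.Dict.empty) p 0)) := by
        rw [if_pos hc]
        by_cases hacc : PySem.Dict.contains acc p = true
        · rw [if_pos hacc]; rfl
        · rw [if_neg hacc, PySem.Dict.getD_of_not_contains acc _ (by simpa using hacc)]
      rw [hstep, ih]
      rw [hc, Bool.true_or, if_pos rfl, List.foldl_cons, if_pos hc]
      by_cases hus : us.any (fun u => PySem.Dict.contains (PySem.Dict.getD U u PySem.Dict.empty) p) = true
      · rw [if_pos hus, PySem.Dict.insert_insert_self, PySem.Dict.getD_insert_self]
      · rw [if_neg hus]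
        rw [pv_foldl_skip _ _ _ _ (by simpa using hus)]
    · rw [if_neg hc, ih, List.foldl_cons, if_neg hc]
      have : PySem.Dict.contains (PySem.Dict.getD U u PySem.Dict.empty) p = false := by
        simpa using hc
      rw [this, Bool.false_or]

-- B's index-building inner loop does not touch keys the user's dict lacks
theorem pv_idx_inner_skip (u p : String) (l : List (String × Int))
    (idx : PySem.Dict String (PySem.Dict String Int)) (h : p ∉ l.map Prod.fst) :
    (l.foldl (fun idx pp =>
      PySem.Dict.modify idx pp.1 PySem.Dict.empty (fun d => PySem.Dict.insert d u pp.2)) idx).get? p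
    = idx.get? p := by
  induction l generalizing idx with
  | nil => rfl
  | cons pp t ih =>
    rw [List.foldl_cons]
    have hne : p ≠ pp.1 := by
      intro he; exact h (by simp [he])
    rw [ih _ (fun hm => h (by simp [List.mem_map] at hm ⊢; exact Or.inr hm))]
    exact PySem.Dict.get?_insert_of_ne _ _ hne

-- B's index-building inner loop at key p
theorem pv_idx_inner (u p : String) (l : List (String × Int))
    (idx : PySem.Dict String (PySem.Dict String Int)) (hnd : (l.map Prod.fst).Nodup) :
    (l.foldl (fun idx pp =>
      PySem.Dict.modify idx pp.1 PySem.Dict.empty (fun d => PySem.Dict.insert d u pp.2)) idx).get? p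
    = match l.find? (fun pp => pp.1 == p) with
      | some pp => some (PySem.Dict.insert (PySem.Dict.getD idx p PySem.Dict.empty) u pp.2)
      | none => idx.get? p := by
  induction l generalizing idx with
  | nil => rfl
  | cons pp t ih =>
    rw [List.foldl_cons]
    by_cases hpk : pp.1 = p
    · have hfind : (pp :: t).find? (fun q => q.1 == p) = some pp := by
        simp [hpk]
      rw [hfind]
      have hnp : p ∉ t.map Prod.fst := by
        rw [List.map_cons] at hnd
        rw [← hpk]; exact (List.nodup_cons.mp hnd).1
      rw [pv_idx_inner_skip u p t _ hnp]
      show (idx.insert pp.1 _).get? p = _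
      rw [hpk, PySem.Dict.get?_insert_self]
    · have hfind : (pp :: t).find? (fun q => q.1 == p) = t.find? (fun q => q.1 == p) := by
        simp [hpk]
      rw [hfind]
      rw [ih _ ((List.nodup_cons.mp (by rw [List.map_cons] at hnd; exact hnd)).2)]
      have hne : p ≠ pp.1 := fun he => hpk he.symm
      have hget : (PySem.Dict.modify idx pp.1 PySem.Dict.empty
          (fun d => PySem.Dict.insert d u pp.2)).get? p = idx.get? p :=
        PySem.Dict.get?_insert_of_ne _ _ hne
      have hgetD : (PySem.Dict.modify idx pp.1 PySem.Dict.empty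
          (fun d => PySem.Dict.insert d u pp.2)).getD p PySem.Dict.empty
          = idx.getD p PySem.Dict.empty := by
        rw [PySem.Dict.getD_eq_get?_getD, PySem.Dict.getD_eq_get?_getD, hget]
      cases t.find? (fun q => q.1 == p) <;> simp [hget, hgetD]

-- B's full index build, characterised at key p
theorem pv_idx_outer (p : String) (us : List (String × PySem.Dict String Int))
    (idx : PySem.Dict String (PySem.Dict String Int))
    (h : ∀ uu ∈ us, (uu.2.items.map Prod.fst).Nodup) :
    (us.foldl (fun idx uu =>
      uu.2.items.foldl (fun idx pp =>
        PySem.Dict.modify idx pp.1 PySem.Dict.empty (fun d => PySem.Dict.insert d uu.1 pp.2)) idx) idx).get? p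
    = if pvHit p us then some (pvFill p us (PySem.Dict.getD idx p PySem.Dict.empty)) else idx.get? p := by
  induction us generalizing idx with
  | nil => simp [pvHit]
  | cons uu us ih =>
    rw [List.foldl_cons]
    have hin := pv_idx_inner uu.1 p uu.2.items idx (h uu (by simp))
    have hcontains : uu.2.contains p = (uu.2.items.find? (fun q => q.1 == p)).isSome := by
      unfold PySem.Dict.contains
      cases hf : uu.2.items.find? (fun q => q.1 == p)
      · have hnone := List.find?_eq_none.mp hf
        simp only [Option.isSome_none]
        exact List.any_eq_false.mpr (fun q hq => by simpa using hnone q hq)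
      · rename_i pp
        have := List.find?_some hf
        have hm := List.mem_of_find?_eq_some hf
        simp only [Option.isSome_some]
        exact List.any_eq_true.mpr ⟨pp, hm, this⟩
    rw [ih _ (fun v hv => h v (by simp [hv]))]
    unfold pvHit pvFill
    rw [List.any_cons, List.foldl_cons]
    cases hf : uu.2.items.find? (fun q => q.1 == p) with
    | some pp =>
      have hc : uu.2.contains p = true := by rw [hcontains, hf]; rfl
      have hval : PySem.Dict.getD uu.2 p 0 = pp.2 := by
        unfold PySem.Dict.getD PySem.Dict.get?
        rw [hf]; rfl
      rw [hf] at hin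
      replace hin : _ = some (PySem.Dict.insert (PySem.Dict.getD idx p PySem.Dict.empty) uu.1 pp.2) := hin
      rw [hc, hval]
      simp only [Bool.true_or, reduceIte]
      have hgd : (uu.2.items.foldl (fun idx pp =>
          PySem.Dict.modify idx pp.1 PySem.Dict.empty (fun d => PySem.Dict.insert d uu.1 pp.2)) idx).getD p PySem.Dict.empty
          = PySem.Dict.insert (PySem.Dict.getD idx p PySem.Dict.empty) uu.1 pp.2 := by
        rw [PySem.Dict.getD_eq_get?_getD, hin]; rfl
      by_cases hus : us.any (fun v => PySem.Dict.contains v.2 p) = true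
      · rw [if_pos hus, hgd]
      · rw [if_neg hus, hin]
        rw [pv_foldl_skip _ _ _ _ (by simpa using hus)]
    | none =>
      have hc : uu.2.contains p = false := by rw [hcontains, hf]; rfl
      rw [hf] at hin
      replace hin : _ = idx.get? p := hin
      rw [hc]
      simp only [Bool.false_or, Bool.false_eq_true, if_false]
      by_cases hus : us.any (fun v => PySem.Dict.contains v.2 p) = true
      · rw [if_pos hus, if_pos hus]
        have hgd : (uu.2.items.foldl (fun idx pp =>
            PySem.Dict.modify idx pp.1 PySem.Dict.empty (fun d => PySem.Dict.insert d uu.1 pp.2)) idx).getD p PySem.Dict.empty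
            = PySem.Dict.getD idx p PySem.Dict.empty := by
          rw [PySem.Dict.getD_eq_get?_getD, hin, ← PySem.Dict.getD_eq_get?_getD]
        rw [hgd]
      · rw [if_neg hus, if_neg hus, hin]

-- the items of pvFill from empty, when the seller names are distinct
theorem pv_fill_items (p : String) (us : List (String × PySem.Dict String Int))
    (hnd : (us.map Prod.fst).Nodup) :
    (pvFill p us PySem.Dict.empty).items
    = (us.filter (fun uu => PySem.Dict.contains uu.2 p)).map (fun uu => (uu.1, PySem.Dict.getD uu.2 p 0)) := by
  unfold pvFill
  rw [PySem.List.foldl_if_eq_foldl_filter]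
  have hsub : ((us.filter (fun uu => PySem.Dict.contains uu.2 p)).map Prod.fst).Nodup :=
    (List.filter_sublist.map Prod.fst).nodup hnd
  have h := PySem.Dict.items_foldl_insert_fresh
    (l := us.filter (fun uu => PySem.Dict.contains uu.2 p))
    (k := fun uu => uu.1) (v := fun uu => PySem.Dict.getD uu.2 p 0) (d := PySem.Dict.empty)
    (fun a _ => PySem.Dict.contains_empty _) hsub
  simpa using h

theorem pv_fill_idem (p : String) (us : List (String × PySem.Dict String Int))
    (hnd : (us.map Prod.fst).Nodup) :
    pvFill p us (pvFill p us PySem.Dict.empty) = pvFill p us PySem.Dict.empty := by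
  have hitems := pv_fill_items p us hnd
  have hkeys : (pvFill p us PySem.Dict.empty).keys.Nodup := by
    show ((pvFill p us PySem.Dict.empty).items.map (fun x => x.1)).Nodup
    rw [hitems, List.map_map]
    have : ((us.filter (fun uu => PySem.Dict.contains uu.2 p)).map Prod.fst).Nodup :=
      (List.filter_sublist.map Prod.fst).nodup hnd
    simpa using this
  conv_lhs => unfold pvFill
  rw [PySem.List.foldl_if_eq_foldl_filter]
  apply pv_foldl_id
  intro uu huu
  apply pv_insert_self _ _ _ hkeys
  apply PySem.Dict.get?_of_mem_items _ _ hkeys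
  rw [hitems]
  exact List.mem_map.mpr ⟨uu, huu, rfl⟩

-- values produced by a dict-building fold of inserts come from the pair list
theorem pv_values_foldl {κ ν : Type} [BEq κ] [LawfulBEq κ] (l : List (κ × ν)) (d : PySem.Dict κ ν)
    (w : ν) (h : w ∈ (l.foldl (fun d pr => d.insert pr.1 pr.2) d).values) :
    w ∈ d.values ∨ w ∈ l.map Prod.snd := by
  induction l generalizing d with
  | nil => exact Or.inl h
  | cons pr t ih =>
    rw [List.foldl_cons] at h
    rcases ih _ h with hd | ht
    · rcases PySem.Dict.mem_values_insert d pr.1 pr.2 w hd with he | hd'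
      · exact Or.inr (by simp [he])
      · exact Or.inl hd'
    · exact Or.inr (by simp [List.mem_map] at ht ⊢; exact Or.inr ht)

-- every value of the wrapped seller dict is itself a dict with unique keys
theorem pv_inner_nodup (spdl : List (String × List (String × Int))) :
    ∀ uu ∈ (PySem.Dict.ofList (spdl.map (fun p => (p.1, PySem.Dict.ofList p.2)))).items,
      (uu.2.items.map Prod.fst).Nodup := by
  intro uu huu
  have hval : uu.2 ∈ (PySem.Dict.ofList (spdl.map (fun p => (p.1, PySem.Dict.ofList p.2)))).values :=
    List.mem_map.mpr ⟨uu, huu, rfl⟩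
  have : uu.2 ∈ (PySem.Dict.empty : PySem.Dict String (PySem.Dict String Int)).values ∨
      uu.2 ∈ (spdl.map (fun p => (p.1, PySem.Dict.ofList p.2))).map Prod.snd :=
    pv_values_foldl _ _ _ hval
  rcases this with he | hm
  · exact absurd he (by simp [PySem.Dict.empty, PySem.Dict.values])
  · rw [List.map_map] at hm
    rcases List.mem_map.mp hm with ⟨pr, _, hpr⟩
    rw [← hpr]
    exact PySem.Dict.nodup_keys_ofList pr.2

-- main fold: A's outer loop equals B's lookup loop
theorem pv_main (U : PySem.Dict String (PySem.Dict String Int))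
    (hU : U.keys.Nodup) (hV : ∀ uu ∈ U.items, (uu.2.items.map Prod.fst).Nodup)
    (ds : List (List (String × String))) (acc : PySem.Dict String (PySem.Dict String Int))
    (hInv : ∀ q, acc.get? q = none ∨ acc.get? q = some (pvFill q U.items PySem.Dict.empty)) :
    ds.foldl (fun acc pd =>
      (PySem.Dict.keys U).foldl (fun acc user =>
        if PySem.Dict.contains (PySem.Dict.getD U user PySem.Dict.empty)
            ((PySem.Dict.ofList pd).keys.head?.getD "") then
          if PySem.Dict.contains acc ((PySem.Dict.ofList pd).keys.head?.getD "") then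
            PySem.Dict.modify acc ((PySem.Dict.ofList pd).keys.head?.getD "") PySem.Dict.empty
              (fun d => PySem.Dict.insert d user
                (PySem.Dict.getD (PySem.Dict.getD U user PySem.Dict.empty)
                  ((PySem.Dict.ofList pd).keys.head?.getD "") 0))
          else
            PySem.Dict.insert acc ((PySem.Dict.ofList pd).keys.head?.getD "")
              (PySem.Dict.insert PySem.Dict.empty user
                (PySem.Dict.getD (PySem.Dict.getD U user PySem.Dict.empty)
                  ((PySem.Dict.ofList pd).keys.head?.getD "") 0))
        else acc) acc) acc
    = ds.foldl (fun res pd =>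
        if PySem.Dict.contains (U.items.foldl (fun idx uu =>
            uu.2.items.foldl (fun idx pp =>
              PySem.Dict.modify idx pp.1 PySem.Dict.empty (fun d => PySem.Dict.insert d uu.1 pp.2)) idx)
            PySem.Dict.empty) ((PySem.Dict.ofList pd).keys.head?.getD "") then
          PySem.Dict.insert res ((PySem.Dict.ofList pd).keys.head?.getD "")
            (PySem.Dict.getD (U.items.foldl (fun idx uu =>
              uu.2.items.foldl (fun idx pp =>
                PySem.Dict.modify idx pp.1 PySem.Dict.empty (fun d => PySem.Dict.insert d uu.1 pp.2)) idx)
              PySem.Dict.empty) ((PySem.Dict.ofList pd).keys.head?.getD "") PySem.Dict.empty)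
        else res) acc := by
  induction ds generalizing acc with
  | nil => rfl
  | cons pd ds ih =>
    rw [List.foldl_cons, List.foldl_cons]
    generalize ((PySem.Dict.ofList pd).keys.head?.getD "" : String) = p
    -- index lookups at p
    have hidx := pv_idx_outer p U.items PySem.Dict.empty hV
    -- A's keys-indexed inner loop is the items-indexed one
    have hkeysfold : ∀ (d0 : PySem.Dict String Int),
        (PySem.Dict.keys U).foldl (fun d u =>
          if PySem.Dict.contains (PySem.Dict.getD U u PySem.Dict.empty) p then
            PySem.Dict.insert d u (PySem.Dict.getD (PySem.Dict.getD U u PySem.Dict.empty) p 0)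
          else d) d0 = pvFill p U.items d0 := by
      intro d0
      unfold PySem.Dict.keys pvFill
      rw [List.foldl_map]
      apply PySem.List.foldl_congr_mem
      intro d uu huu
      rw [PySem.Dict.getD_of_mem_items U (by exact huu) hU]
    have hkeysany : (PySem.Dict.keys U).any (fun u => PySem.Dict.contains (PySem.Dict.getD U u PySem.Dict.empty) p)
        = pvHit p U.items := by
      unfold PySem.Dict.keys pvHit
      rw [List.any_map]
      apply PySem.List.any_congr_mem
      intro uu huu
      show PySem.Dict.contains (PySem.Dict.getD U uu.1 PySem.Dict.empty) p = _
      rw [PySem.Dict.getD_of_mem_items U (by exact huu) hU]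
    rw [pv_inner, hkeysany]
    have hcont : PySem.Dict.contains (U.items.foldl (fun idx uu =>
        uu.2.items.foldl (fun idx pp =>
          PySem.Dict.modify idx pp.1 PySem.Dict.empty (fun d => PySem.Dict.insert d uu.1 pp.2)) idx)
        PySem.Dict.empty) p = pvHit p U.items := by
      rw [PySem.Dict.contains_eq_isSome_get?, hidx]
      by_cases hh : pvHit p U.items = true
      · simp [hh]
      · simp only [Bool.not_eq_true] at hh
        simp [hh, PySem.Dict.get?_empty]
    rw [hcont]
    by_cases hhit : pvHit p U.items = true
    · rw [if_pos hhit, if_pos hhit, hkeysfold]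
      have hgdidx : PySem.Dict.getD (U.items.foldl (fun idx uu =>
          uu.2.items.foldl (fun idx pp =>
            PySem.Dict.modify idx pp.1 PySem.Dict.empty (fun d => PySem.Dict.insert d uu.1 pp.2)) idx)
          PySem.Dict.empty) p PySem.Dict.empty = pvFill p U.items PySem.Dict.empty := by
        rw [PySem.Dict.getD_eq_get?_getD, hidx, if_pos hhit]
        simp [PySem.Dict.getD_empty]
      rw [hgdidx]
      have hacc : pvFill p U.items (PySem.Dict.getD acc p PySem.Dict.empty)
          = pvFill p U.items PySem.Dict.empty := by
        rcases hInv p with hn | hs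
        · rw [PySem.Dict.getD_eq_get?_getD, hn]
          rfl
        · rw [PySem.Dict.getD_eq_get?_getD, hs]
          show pvFill p U.items (pvFill p U.items PySem.Dict.empty) = _
          apply pv_fill_idem
          exact (by simpa [PySem.Dict.keys] using hU)
      rw [hacc]
      apply ih
      intro q
      by_cases hq : q = p
      · rw [hq, PySem.Dict.get?_insert, if_pos rfl]
        exact Or.inr rfl
      · rw [PySem.Dict.get?_insert, if_neg hq]
        exact hInv q
    · rw [if_neg hhit, if_neg hhit]
      exact ih acc hInv

-- ===== VERDICT (by name: the statement is the Claim_ definition above) =====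
theorem create_list_of_pokemon_to_users_spec : Claim_equal_create_list_of_pokemon_to_users := by
  intro p2u spdl _ _
  unfold Spec_create_list_of_pokemon_to_users
  unfold create_list_of_pokemon_to_users create_list_of_pokemon_to_users_alt
  simp only [pv_pyGet_zero]
  rw [List.foldl_map]
  exact congrArg (fun r : PySem.Dict String (PySem.Dict String Int) => r.items.map (fun p => (p.1, p.2.items)))
    (pv_main _ (PySem.Dict.nodup_keys_ofList _) (pv_inner_nodup spdl) p2u _
      (fun q => Or.inl (PySem.Dict.get?_empty q)))
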